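-- pv_equiv track=rewrite | github.com/jackrlynn/species-divergence | tools/hashbox.py | getSmilarityExcludeAlignment
-- ===== SOURCE A (Python) =====
-- def hash(seq):
--     h = 0
--     for i in range(len(seq)):
--         if (seq[i] == 'A'):
--             h += 0 * (4 ** i)
--         elif (seq[i] == 'C'):
--             h += 1 * (4 ** i)
--         elif (seq[i] == 'G'):
--             h += 2 * (4 ** i)
--         elif (seq[i] == 'T' or seq[i] == 'U'):
--             h += 3 * (4 ** i)
--     return h
--
-- def createHashList(seq, k, should_sort):
--     hash_lst = []
--     for i in range(k-1, len(seq)):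
--         hash_lst.append(hash(seq[i-k+1:i+1]))
--     if should_sort:
--         hash_lst.sort()
--     return hash_lst
--
-- def isAligned(align1, align2, pos1, pos2):
--     align_pos1 = convertPosToAlignedPos(pos1, align1)
--     align_pos2 = convertPosToAlignedPos(pos2, align2)
--     if (align_pos1 == align_pos2):
--         return True
--     else:
--         return False
--
-- def convertPosToAlignedPos(pos, align):
--     new_pos = 0
--     i = 0
--     while (i != pos):
--         if (align[new_pos] == '-'):
--             new_pos += 1
--         else:
--             new_pos += 1
--             i += 1
--     return new_pos
--
-- def getSmilarityExcludeAlignment(seq1, seq2, k, align1, align2):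
--     lst1 = createHashList(seq1, k, False)
--     lst2 = createHashList(seq2, k, False)
--
--     ct = 0
--     for i in range(len(lst1)):
--         for j in range(len(lst2)):
--             kmer1 = lst1[i]
--             kmer2 = lst2[j]
--             if (kmer1 == kmer2):
--                 if (not isAligned(align1, align2, i+k-1, j+k-1)):
--                     ct += 1
--
--     return ct
-- ===== SOURCE B (Python) =====
-- def _digit(c):
--     if c == 'C':
--         return 1
--     if c == 'G':
--         return 2
--     if c == 'T' or c == 'U':
--         return 3
--     return 0
--
--
-- def _hashes(seq, k):
--     # Horner evaluation of each k-mer's base-4 little-endian hash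
--     out = []
--     for i in range(0, len(seq) - k + 1):
--         h = 0
--         for c in reversed(seq[i:i + k]):
--             h = h * 4 + _digit(c)
--         out.append(h)
--     return out
--
--
-- def _alignedPos(align, pos):
--     # index just past the pos-th non-gap character of align
--     np = 0
--     seen = 0
--     while seen < pos:
--         if align[np] != '-':
--             seen += 1
--         np += 1
--     return np
--
--
-- def getSmilarityExcludeAlignment(seq1, seq2, k, align1, align2):
--     lst1 = _hashes(seq1, k)
--     lst2 = _hashes(seq2, k)
--     hs1 = set(lst1)
--     cnt = {}   # shared hash -> multiplicity in lst2
--     cntp = {}  # (shared hash, aligned end position) -> multiplicity in lst2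
--     for j, h in enumerate(lst2):
--         if h in hs1:
--             cnt[h] = cnt.get(h, 0) + 1
--             key = (h, _alignedPos(align2, j + k - 1))
--             cntp[key] = cntp.get(key, 0) + 1
--     ct = 0
--     for i, h in enumerate(lst1):
--         c = cnt.get(h, 0)
--         if c != 0:
--             ct += c - cntp.get((h, _alignedPos(align1, i + k - 1)), 0)
--     return ct
-- ===== Notes on version B (the rewrite author's own statement) =====
-- stated objective: faster
-- what changed: B replaces A's nested scan over all k-mer index pairs (each pair re-hashing windows and re-walking the alignment strings) by Horner window hashing plus a set of seq1 hashes and two counting dictionaries over seq2 keyed by hash and (hash, aligned end position), each aligned position computed once by a single linear scan, so the count is one pass over each hash list.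
import Mathlib
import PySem

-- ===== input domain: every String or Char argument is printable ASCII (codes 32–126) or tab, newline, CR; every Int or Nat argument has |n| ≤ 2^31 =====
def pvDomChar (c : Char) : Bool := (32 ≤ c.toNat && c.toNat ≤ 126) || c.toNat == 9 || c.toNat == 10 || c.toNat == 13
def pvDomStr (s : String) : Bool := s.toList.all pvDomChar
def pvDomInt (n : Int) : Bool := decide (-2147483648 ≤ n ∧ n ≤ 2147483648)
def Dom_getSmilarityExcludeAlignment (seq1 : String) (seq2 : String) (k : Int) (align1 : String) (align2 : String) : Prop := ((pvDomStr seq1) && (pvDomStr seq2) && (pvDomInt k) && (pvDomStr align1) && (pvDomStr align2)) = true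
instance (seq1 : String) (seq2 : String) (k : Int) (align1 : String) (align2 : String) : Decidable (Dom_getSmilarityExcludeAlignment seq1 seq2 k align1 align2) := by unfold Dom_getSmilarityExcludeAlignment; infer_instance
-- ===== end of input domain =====

-- B replaces A's all-pairs scan (re-hashing and re-walking the alignments per pair) by grouping:
-- a set of seq1 hashes plus hash/(hash,aligned-end-position) counting dicts over seq2; objective: faster.

-- ===== PORT A =====
-- hash(seq): base-4 digit-weighted sum over the characters
def hashA (cs : List Char) : Int :=
  (PySem.List.pyRange 0 (cs.length : Int) 1).foldl (fun h i =>
    let c := PySem.List.pyGetD cs i ' '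
    if c = 'A' then h + 0 * 4 ^ i.toNat
    else if c = 'C' then h + 1 * 4 ^ i.toNat
    else if c = 'G' then h + 2 * 4 ^ i.toNat
    else if c = 'T' ∨ c = 'U' then h + 3 * 4 ^ i.toNat
    else h) 0

-- createHashList(seq, k, should_sort) (A only ever calls it with should_sort=False)
def createHashListA (cs : List Char) (k : Int) (should_sort : Bool) : List Int :=
  let hash_lst := (PySem.List.pyRange (k - 1) (cs.length : Int) 1).foldl
    (fun acc i => acc ++ [hashA (PySem.List.slice cs (some (i - k + 1)) (some (i + 1)))]) []
  if should_sort then PySem.List.sorted hash_lst (fun x => x) else hash_lst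

-- convertPosToAlignedPos's while loop; none = IndexError on align[new_pos]
def convertGoA (cs : List Char) (pos : Int) (new_pos : Nat) (i : Int) : Option Nat :=
  if i = pos then some new_pos
  else match h : cs[new_pos]? with
    | none => none
    | some c =>
      if c = '-' then convertGoA cs pos (new_pos + 1) i
      else convertGoA cs pos (new_pos + 1) (i + 1)
termination_by cs.length - new_pos
decreasing_by
  all_goals (obtain ⟨hlt, -⟩ := List.getElem?_eq_some_iff.mp h; omega)

def convertPosA (pos : Int) (align : String) : Option Nat :=
  convertGoA align.toList pos 0 0

def isAlignedA (align1 align2 : String) (pos1 pos2 : Int) : Option Bool :=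
  match convertPosA pos1 align1 with
  | none => none
  | some a =>
    match convertPosA pos2 align2 with
    | none => none
    | some b => some (decide (a = b))

def getSmilarityExcludeAlignment (seq1 : String) (seq2 : String) (k : Int) (align1 : String) (align2 : String) : Int :=
  let lst1 := createHashListA seq1.toList k false
  let lst2 := createHashListA seq2.toList k false
  let res : Option Int :=
    (PySem.List.pyRange 0 (lst1.length : Int) 1).foldl (fun acc i =>
      (PySem.List.pyRange 0 (lst2.length : Int) 1).foldl (fun acc2 j =>
        match acc2 with
        | none => none
        | some ct =>
          let kmer1 := PySem.List.pyGetD lst1 i 0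
          let kmer2 := PySem.List.pyGetD lst2 j 0
          if kmer1 = kmer2 then
            match isAlignedA align1 align2 (i + k - 1) (j + k - 1) with
            | none => none
            | some b => if b then some ct else some (ct + 1)
          else some ct) acc) (some 0)
  res.getD 0

-- ===== PORT B =====
def digB (c : Char) : Int :=
  if c = 'C' then 1 else if c = 'G' then 2 else if c = 'T' ∨ c = 'U' then 3 else 0

-- _hashes: Horner evaluation of each k-mer window
def hashesB (cs : List Char) (k : Int) : List Int :=
  (PySem.List.pyRange 0 ((cs.length : Int) - k + 1) 1).foldl
    (fun out i =>
      out ++ [(PySem.List.slice cs (some i) (some (i + k))).reverse.foldl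
                (fun h c => h * 4 + digB c) 0]) []

-- _alignedPos's while loop; none = IndexError on align[np]
def apGoB (cs : List Char) (pos : Int) (np : Nat) (seen : Int) : Option Nat :=
  if seen < pos then
    match h : cs[np]? with
    | none => none
    | some c =>
      if c ≠ '-' then apGoB cs pos (np + 1) (seen + 1)
      else apGoB cs pos (np + 1) seen
  else some np
termination_by cs.length - np
decreasing_by
  all_goals (obtain ⟨hlt, -⟩ := List.getElem?_eq_some_iff.mp h; omega)

def apB (align : List Char) (pos : Int) : Option Nat := apGoB align pos 0 0

def getSmilarityExcludeAlignment_alt (seq1 : String) (seq2 : String) (k : Int) (align1 : String) (align2 : String) : Int :=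
  let lst1 := hashesB seq1.toList k
  let lst2 := hashesB seq2.toList k
  let hs1 : PySem.Set Int := PySem.Set.ofList lst1
  let st : Option (PySem.Dict Int Int × PySem.Dict (Int × Nat) Int) :=
    (PySem.List.enumerate lst2 0).foldl (fun acc e =>
      match acc with
      | none => none
      | some s =>
        if hs1.contains e.2 then
          match apB align2.toList (e.1 + k - 1) with
          | none => none
          | some p => some (s.1.insert e.2 (s.1.getD e.2 0 + 1),
                            s.2.insert (e.2, p) (s.2.getD (e.2, p) 0 + 1))
        else some s) (some (PySem.Dict.empty, PySem.Dict.empty))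
  match st with
  | none => 0
  | some s =>
    let res : Option Int :=
      (PySem.List.enumerate lst1 0).foldl (fun acc e =>
        match acc with
        | none => none
        | some ct =>
          let c := s.1.getD e.2 0
          if c ≠ 0 then
            match apB align1.toList (e.1 + k - 1) with
            | none => none
            | some p => some (ct + (c - s.2.getD (e.2, p) 0))
          else some ct) (some 0)
    res.getD 0

-- ===== PRECONDITION & SPEC =====
def pvDig (c : Char) : Int :=
  if c = 'C' then 1 else if c = 'G' then 2 else if c = 'T' ∨ c = 'U' then 3 else 0

def pvNondash (cs : List Char) : Nat := cs.countP (fun c => c != '-')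

-- the base-4 digit string of the k-mer window of cs starting at t (two windows hash equal iff these are equal)
def pvWin (cs : List Char) (K t : Nat) : List Int := ((cs.drop t).take K).map pvDig

-- Pre_ excludes exactly the inputs on which A raises IndexError in convertPosToAlignedPos: k ≤ 0
-- (the conversion loop can never reach a negative target and walks off the alignment), or some
-- equal-hash k-mer pair whose end position exceeds the number of non-gap characters of its alignment.
def Pre_getSmilarityExcludeAlignment (seq1 : String) (seq2 : String) (k : Int) (align1 : String) (align2 : String) : Prop :=
  1 ≤ k ∧
  ∀ t : Nat, t < ((seq1.toList.length : Int) - k + 1).toNat →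
    ∀ j : Nat, j < ((seq2.toList.length : Int) - k + 1).toNat →
      pvWin seq1.toList k.toNat t = pvWin seq2.toList k.toNat j →
      (t + k.toNat - 1 ≤ pvNondash align1.toList ∧ j + k.toNat - 1 ≤ pvNondash align2.toList)
instance (seq1 : String) (seq2 : String) (k : Int) (align1 : String) (align2 : String) : Decidable (Pre_getSmilarityExcludeAlignment seq1 seq2 k align1 align2) := by
  unfold Pre_getSmilarityExcludeAlignment; infer_instance

def pvWitness_getSmilarityExcludeAlignment : String × String × Int × String × String :=
  ("ACG", "ACG", 2, "ACG", "A-CG")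

def Spec_getSmilarityExcludeAlignment (seq1 : String) (seq2 : String) (k : Int) (align1 : String) (align2 : String) (out : Int) : Prop := out = getSmilarityExcludeAlignment_alt seq1 seq2 k align1 align2
instance (seq1 : String) (seq2 : String) (k : Int) (align1 : String) (align2 : String) (out : Int) : Decidable (Spec_getSmilarityExcludeAlignment seq1 seq2 k align1 align2 out) := by unfold Spec_getSmilarityExcludeAlignment; infer_instance

-- ===== CLAIM (what is proved, stated in full; the proofs are below) =====
def Claim_equal_getSmilarityExcludeAlignment : Prop := ∀ (seq1 : String) (seq2 : String) (k : Int) (align1 : String) (align2 : String), Dom_getSmilarityExcludeAlignment seq1 seq2 k align1 align2 → Pre_getSmilarityExcludeAlignment seq1 seq2 k align1 align2 → Spec_getSmilarityExcludeAlignment seq1 seq2 k align1 align2 (getSmilarityExcludeAlignment seq1 seq2 k align1 align2)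

-- ===== LEMMAS AND PROOFS =====

theorem pvWitness_ok :
    Dom_getSmilarityExcludeAlignment pvWitness_getSmilarityExcludeAlignment.1 pvWitness_getSmilarityExcludeAlignment.2.1 pvWitness_getSmilarityExcludeAlignment.2.2.1 pvWitness_getSmilarityExcludeAlignment.2.2.2.1 pvWitness_getSmilarityExcludeAlignment.2.2.2.2 ∧
    Pre_getSmilarityExcludeAlignment pvWitness_getSmilarityExcludeAlignment.1 pvWitness_getSmilarityExcludeAlignment.2.1 pvWitness_getSmilarityExcludeAlignment.2.2.1 pvWitness_getSmilarityExcludeAlignment.2.2.2.1 pvWitness_getSmilarityExcludeAlignment.2.2.2.2 := by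
  constructor <;> decide

-- reference little-endian base-4 hash over characters
def pvHorner : List Char → Int
  | [] => 0
  | c :: t => pvHorner t * 4 + digB c

-- reference little-endian base-4 value of a digit string
def pvHornerD : List Int → Int
  | [] => 0
  | d :: t => pvHornerD t * 4 + d

-- reference aligned position of sequence position p
def pvApos : List Char → Nat → Nat
  | _, 0 => 0
  | [], _ + 1 => 0
  | c :: t, p + 1 => if c = '-' then pvApos t (p + 1) + 1 else pvApos t p + 1

-- the k-mer hash at window t
def pvWnd (cs : List Char) (K t : Nat) : Int := pvHorner ((cs.drop t).take K)

theorem digB_eq_pvDig : digB = pvDig := rfl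

theorem pvDig_bounds (c : Char) : 0 ≤ pvDig c ∧ pvDig c < 4 := by
  unfold pvDig; split_ifs <;> norm_num

theorem pvHorner_eq_hornerD (l : List Char) : pvHorner l = pvHornerD (l.map pvDig) := by
  induction l with
  | nil => rfl
  | cons c t ih => simp [pvHorner, pvHornerD, ih, digB_eq_pvDig]

theorem hornerD_inj (l1 : List Int) : ∀ l2 : List Int, l1.length = l2.length →
    (∀ d ∈ l1, 0 ≤ d ∧ d < 4) → (∀ d ∈ l2, 0 ≤ d ∧ d < 4) →
    pvHornerD l1 = pvHornerD l2 → l1 = l2 := by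
  induction l1 with
  | nil => intro l2 hlen _ _ _; exact (List.length_eq_zero_iff.mp hlen.symm).symm ▸ rfl
  | cons d1 t1 ih =>
    intro l2 hlen hb1 hb2 he
    cases l2 with
    | nil => simp at hlen
    | cons d2 t2 =>
      have hd1 := hb1 d1 (by simp)
      have hd2 := hb2 d2 (by simp)
      simp only [pvHornerD] at he
      have hdd : d1 = d2 ∧ pvHornerD t1 = pvHornerD t2 := by omega
      have ht : t1 = t2 := ih t2 (by simpa using hlen)
        (fun d hd => hb1 d (by simp [hd])) (fun d hd => hb2 d (by simp [hd])) hdd.2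
      rw [hdd.1, ht]

-- windows of full length K: hashes equal iff digit strings equal
theorem wnd_eq_iff (cs1 cs2 : List Char) (K t j : Nat)
    (h1 : t + K ≤ cs1.length) (h2 : j + K ≤ cs2.length) :
    pvWnd cs2 K j = pvWnd cs1 K t ↔ pvWin cs2 K j = pvWin cs1 K t := by
  constructor
  · intro h
    apply hornerD_inj
    · simp [pvWin]; omega
    · intro d hd
      obtain ⟨c, -, rfl⟩ := List.mem_map.mp hd
      exact pvDig_bounds c
    · intro d hd
      obtain ⟨c, -, rfl⟩ := List.mem_map.mp hd
      exact pvDig_bounds c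
    · unfold pvWin
      rw [← pvHorner_eq_hornerD, ← pvHorner_eq_hornerD]
      exact h
  · intro h
    unfold pvWnd
    rw [pvHorner_eq_hornerD, pvHorner_eq_hornerD]
    exact congrArg pvHornerD h

theorem pvHorner_append (cs : List Char) (c : Char) :
    pvHorner (cs ++ [c]) = pvHorner cs + digB c * 4 ^ cs.length := by
  induction cs with
  | nil => simp [pvHorner]
  | cons x t ih => simp [pvHorner, ih]; ring

theorem stepA_eq (h : Int) (c : Char) (w : Int) :
    (if c = 'A' then h + 0 * w
     else if c = 'C' then h + 1 * w
     else if c = 'G' then h + 2 * w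
     else if c = 'T' ∨ c = 'U' then h + 3 * w
     else h) = h + digB c * w := by
  unfold digB
  split_ifs <;> simp_all <;> ring

theorem foldl_range_dig (cs : List Char) :
    (List.range cs.length).foldl (fun h j => h + digB (cs.getD j ' ') * 4 ^ j) 0 = pvHorner cs := by
  induction cs using List.reverseRecOn with
  | nil => simp [pvHorner]
  | append_singleton cs c ih =>
    have hlen : (cs ++ [c]).length = cs.length + 1 := by simp
    rw [hlen, List.range_succ, List.foldl_append]
    have hpre : (List.range cs.length).foldl (fun h j => h + digB ((cs ++ [c]).getD j ' ') * 4 ^ j) 0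
        = (List.range cs.length).foldl (fun h j => h + digB (cs.getD j ' ') * 4 ^ j) 0 := by
      apply PySem.List.foldl_congr_mem
      intro acc j hj
      rw [List.getD_append _ _ _ _ (List.mem_range.mp hj)]
    rw [hpre, ih]
    have hlast : (cs ++ [c]).getD cs.length ' ' = c := by simp
    simp only [List.foldl_cons, List.foldl_nil, hlast, pvHorner_append]

theorem hashA_eq (cs : List Char) : hashA cs = pvHorner cs := by
  unfold hashA
  rw [show ((cs.length : Int)) = ((cs.length : Nat) : Int) from rfl,
      PySem.List.pyRange_zero_nat, List.foldl_map]
  refine Eq.trans (PySem.List.foldl_congr_mem _ _ _ _ ?_) (foldl_range_dig cs)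
  intro acc j hj
  simp only [PySem.List.pyGetD_natCast, Int.toNat_natCast]
  exact stepA_eq acc _ _

theorem createHashListA_eq (cs : List Char) (k : Int) (K : Nat) (hk : k = (K : Int)) :
    createHashListA cs k false =
      (List.range ((cs.length : Int) - k + 1).toNat).map (fun t => pvWnd cs K t) := by
  unfold createHashListA
  simp only [Bool.false_eq_true, if_false, PySem.List.foldl_append_singleton_eq_map,
    List.nil_append]
  rw [PySem.List.pyRange_one,
      show ((cs.length : Int) - (k - 1)) = (cs.length : Int) - k + 1 from by ring,
      List.map_map]
  apply List.map_congr_left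
  intro t _
  simp only [Function.comp_apply]
  rw [show (k - 1 + (t : Int) - k + 1) = ((t : Nat) : Int) from by push_cast; ring,
      show (k - 1 + (t : Int) + 1) = ((t : Nat) : Int) + ((K : Nat) : Int) from by rw [hk]; push_cast; ring,
      PySem.List.slice_natCast_add, hashA_eq]
  rfl

theorem foldr_horner (l : List Char) :
    l.foldr (fun c h => h * 4 + digB c) 0 = pvHorner l := by
  induction l with
  | nil => rfl
  | cons c t ih => simp [pvHorner, ih]

theorem hashesB_eq (cs : List Char) (k : Int) (K : Nat) (hk : k = (K : Int)) :
    hashesB cs k = (List.range ((cs.length : Int) - k + 1).toNat).map (fun t => pvWnd cs K t) := by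
  unfold hashesB
  simp only [PySem.List.foldl_append_singleton_eq_map, List.nil_append]
  rw [PySem.List.pyRange_one,
      show ((cs.length : Int) - k + 1 - 0) = (cs.length : Int) - k + 1 from by ring,
      List.map_map]
  apply List.map_congr_left
  intro t _
  simp only [Function.comp_apply, zero_add]
  rw [hk, PySem.List.slice_natCast_add, List.foldl_reverse]
  exact foldr_horner _

theorem convertGoA_eq (fl : List Char) : ∀ (np : Nat) (pos i : Int), np ≤ fl.length → i ≤ pos →
    (pos - i).toNat ≤ pvNondash (fl.drop np) →
    convertGoA fl pos np i = some (np + pvApos (fl.drop np) (pos - i).toNat) := by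
  suffices h : ∀ (fuel np : Nat) (pos i : Int), fl.length - np ≤ fuel → np ≤ fl.length → i ≤ pos →
      (pos - i).toNat ≤ pvNondash (fl.drop np) →
      convertGoA fl pos np i = some (np + pvApos (fl.drop np) (pos - i).toNat) by
    intro np pos i h1 h2 h3
    exact h (fl.length - np) np pos i le_rfl h1 h2 h3
  intro fuel
  induction fuel with
  | zero =>
    intro np pos i hf h1 h2 h3
    have hdrop : fl.drop np = [] := List.drop_eq_nil_of_le (by omega)
    rw [hdrop] at h3
    have h0 : (pos - i).toNat = 0 := by simpa [pvNondash] using h3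
    have hip : i = pos := by omega
    rw [convertGoA, if_pos hip, hdrop, h0]
    simp [pvApos]
  | succ fuel ih =>
    intro np pos i hf h1 h2 h3
    by_cases hip : i = pos
    · rw [convertGoA, if_pos hip]
      simp [hip, pvApos]
    · have hlt : i < pos := lt_of_le_of_ne h2 hip
      obtain ⟨m, hm⟩ : ∃ m, (pos - i).toNat = m + 1 := ⟨(pos - i).toNat - 1, by omega⟩
      have hnd1 : 1 ≤ pvNondash (fl.drop np) := by omega
      have hnplt : np < fl.length := by
        by_contra hc
        have hnil : fl.drop np = [] := List.drop_eq_nil_of_le (by omega)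
        rw [hnil] at hnd1
        simp [pvNondash] at hnd1
      have hdrop : fl.drop np = fl[np] :: fl.drop (np + 1) := List.drop_eq_getElem_cons hnplt
      rw [convertGoA, if_neg hip]
      split
      · next heq => exact absurd heq (by simp [List.getElem?_eq_getElem hnplt])
      · next c heq =>
        obtain ⟨hlt2, hc⟩ := List.getElem?_eq_some_iff.mp heq
        have hdrop' : fl.drop np = c :: fl.drop (np + 1) := by rw [hdrop, hc]
        by_cases hdash : c = '-'
        · rw [if_pos hdash]
          have hnd' : (pos - i).toNat ≤ pvNondash (fl.drop (np + 1)) := by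
            have : pvNondash (fl.drop np) = pvNondash (fl.drop (np + 1)) := by
              rw [hdrop']
              simp [pvNondash, List.countP_cons, hdash]
            omega
          rw [ih (np + 1) pos i (by omega) (by omega) h2 hnd']
          rw [hdrop', hm]
          refine congrArg some ?_
          simp only [pvApos]
          rw [if_pos hdash]
          omega
        · rw [if_neg hdash]
          have hcount : pvNondash (fl.drop np) = pvNondash (fl.drop (np + 1)) + 1 := by
            rw [hdrop']
            simp [pvNondash, List.countP_cons, hdash]
          have hnd' : (pos - (i + 1)).toNat ≤ pvNondash (fl.drop (np + 1)) := by omega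
          rw [ih (np + 1) pos (i + 1) (by omega) (by omega) (by omega) hnd']
          rw [hdrop', hm, show (pos - (i + 1)).toNat = m from by omega]
          refine congrArg some ?_
          simp only [pvApos]
          rw [if_neg hdash]
          omega

theorem convertPosA_eq (align : String) (pos : Int) (h0 : 0 ≤ pos)
    (h : pos.toNat ≤ pvNondash align.toList) :
    convertPosA pos align = some (pvApos align.toList pos.toNat) := by
  have := convertGoA_eq align.toList 0 pos 0 (by omega) h0 (by simpa using h)
  simpa [convertPosA] using this

-- B's while loop equals A's while loop whenever the counter has not overshot the target
theorem apGoB_eq_convertGoA (cs : List Char) : ∀ (np : Nat) (pos seen : Int), seen ≤ pos →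
    apGoB cs pos np seen = convertGoA cs pos np seen := by
  suffices h : ∀ (fuel np : Nat) (pos seen : Int), cs.length - np ≤ fuel → seen ≤ pos →
      apGoB cs pos np seen = convertGoA cs pos np seen by
    intro np pos seen hle
    exact h (cs.length - np) np pos seen le_rfl hle
  intro fuel
  induction fuel with
  | zero =>
    intro np pos seen hf hle
    have hnone : cs[np]? = none := by
      rw [List.getElem?_eq_none_iff]; omega
    rw [apGoB, convertGoA]
    by_cases heq : seen = pos
    · rw [if_neg (by omega), if_pos heq]
    · rw [if_pos (by omega), if_neg heq]
      split
      · rfl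
      · rename_i c h2; rw [hnone] at h2; cases h2
  | succ fuel ih =>
    intro np pos seen hf hle
    rw [apGoB, convertGoA]
    by_cases heq : seen = pos
    · rw [if_neg (by omega), if_pos heq]
    · rw [if_pos (by omega), if_neg heq]
      split
      · rfl
      · rename_i c h2
        have hlt := (List.getElem?_eq_some_iff.mp h2).1
        by_cases hdash : c = '-'
        · rw [if_neg (by simp [hdash]), if_pos hdash]
          exact ih (np + 1) pos seen (by omega) hle
        · rw [if_pos hdash, if_neg hdash]
          exact ih (np + 1) pos (seen + 1) (by omega) (by omega)

theorem apB_some (cs : List Char) (pos : Int) (h0 : 0 ≤ pos)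
    (h : pos.toNat ≤ pvNondash cs) :
    apB cs pos = some (pvApos cs pos.toNat) := by
  unfold apB
  rw [apGoB_eq_convertGoA cs 0 pos 0 h0]
  have := convertGoA_eq cs 0 pos 0 (by omega) h0 (by simpa using h)
  simpa using this

-- Option-threaded fold that never hits none computes the pure fold
theorem foldl_option_some {α β : Type} (l : List α) (f : Option β → α → Option β) (g : β → α → β)
    (hf : ∀ b x, x ∈ l → f (some b) x = some (g b x)) :
    ∀ (a : β), l.foldl f (some a) = some (l.foldl g a) := by
  induction l with
  | nil => intro a; rfl
  | cons x t ih =>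
    intro a
    simp only [List.foldl_cons, hf a x (by simp)]
    exact ih (fun b y hy => hf b y (by simp [hy])) _

-- counting by a conditional insert loop
theorem getD_foldl_cond_insert {κ α : Type} [BEq κ] [LawfulBEq κ] [DecidableEq κ]
    (l : List α) (P : α → Bool) (key : α → κ) (k0 : κ) :
    ∀ d : PySem.Dict κ Int,
    (l.foldl (fun d x => if P x then d.insert (key x) (d.getD (key x) 0 + 1) else d) d).getD k0 0
      = d.getD k0 0 + (l.countP (fun x => P x && (key x == k0)) : Int) := by
  induction l with
  | nil => intro d; simp
  | cons x t ih =>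
    intro d
    by_cases hp : P x
    · rw [List.foldl_cons, if_pos hp, ih]
      rw [PySem.Dict.getD_insert]
      by_cases hk : k0 = key x
      · rw [if_pos hk, hk]
        simp [List.countP_cons, hp]
        ring
      · rw [if_neg hk]
        have : (key x == k0) = false := by
          simp [Ne.symm hk]
        simp [this]
    · rw [List.foldl_cons, if_neg hp, ih]
      have : (P x) = false := by simpa using hp
      simp [this]

theorem countP_and_ne_bool {α : Type} (l : List α) (p q : α → Bool) :
    ((l.countP (fun x => p x && !q x) : Int)) =
      (l.countP p : Int) - (l.countP (fun x => p x && q x) : Int) := by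
  induction l with
  | nil => simp
  | cons x t ih =>
    cases hp : p x <;> cases hq : q x <;>
      simp [hp, hq, ih] <;> omega

theorem countP_and_ne {α : Type} (l : List α) (P Q : α → Prop) [DecidablePred P] [DecidablePred Q] :
    ((l.countP (fun x => decide (P x ∧ ¬ Q x)) : Int)) =
      (l.countP (fun x => decide (P x)) : Int) - (l.countP (fun x => decide (P x ∧ Q x)) : Int) := by
  simp only [Bool.decide_and, decide_not]
  exact countP_and_ne_bool l (fun x => decide (P x)) (fun x => decide (Q x))

theorem enumerate_map_range {α : Type} (m : Nat) (f : Nat → α) :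
    PySem.List.enumerate ((List.range m).map f) 0 =
      (List.range m).map (fun (j : Nat) => ((j : Int), f j)) := by
  apply List.ext_getElem
  · simp [PySem.List.length_enumerate]
  · intro n h1 h2
    rw [PySem.List.getElem_enumerate]
    simp at h2 ⊢

-- A evaluates to the double sum of non-aligned equal-hash pair indicators
theorem A_eval (seq1 seq2 : String) (k : Int) (align1 align2 : String) (K : Nat)
    (hk : k = (K : Int)) (hK : 1 ≤ K)
    (hm : ∀ t, t < ((seq1.toList.length : Int) - k + 1).toNat →
      ∀ j, j < ((seq2.toList.length : Int) - k + 1).toNat →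
      pvWnd seq2.toList K j = pvWnd seq1.toList K t →
      (t + K - 1 ≤ pvNondash align1.toList ∧ j + K - 1 ≤ pvNondash align2.toList)) :
    getSmilarityExcludeAlignment seq1 seq2 k align1 align2 =
      ((List.range ((seq1.toList.length : Int) - k + 1).toNat).map (fun t =>
        ((List.range ((seq2.toList.length : Int) - k + 1).toNat).countP (fun j =>
          decide (pvWnd seq2.toList K j = pvWnd seq1.toList K t ∧
            pvApos align1.toList (t + K - 1) ≠ pvApos align2.toList (j + K - 1))) : Int))).sum := by
  unfold getSmilarityExcludeAlignment
  simp only [createHashListA_eq seq1.toList k K hk, createHashListA_eq seq2.toList k K hk,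
    List.length_map, List.length_range, PySem.List.pyRange_zero_nat, List.foldl_map]
  rw [foldl_option_some _ _
    (fun b t => b + (((List.range ((seq2.toList.length : Int) - k + 1).toNat).countP (fun j =>
      decide (pvWnd seq2.toList K j = pvWnd seq1.toList K t ∧
        pvApos align1.toList (t + K - 1) ≠ pvApos align2.toList (j + K - 1)))) : Int)) ?_]
  · rw [Option.getD_some, PySem.List.foldl_add, zero_add]
  · intro b t ht
    have htm : t < ((seq1.toList.length : Int) - k + 1).toNat := List.mem_range.mp ht
    have htK : t + K ≤ seq1.toList.length := by omega
    rw [foldl_option_some _ _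
      (fun ct j => if (pvWnd seq2.toList K j = pvWnd seq1.toList K t ∧
        pvApos align1.toList (t + K - 1) ≠ pvApos align2.toList (j + K - 1)) then ct + 1 else ct) ?_]
    · rw [PySem.List.foldl_ite_add_one]
    · intro ct j hj
      have hjm : j < ((seq2.toList.length : Int) - k + 1).toNat := List.mem_range.mp hj
      have hjK : j + K ≤ seq2.toList.length := by omega
      have hg1 : PySem.List.pyGetD
          ((List.range ((seq1.toList.length : Int) - k + 1).toNat).map (fun t => pvWnd seq1.toList K t))
          ((t : Nat) : Int) 0 = pvWnd seq1.toList K t := by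
        rw [PySem.List.pyGetD_natCast, PySem.List.getD_map_range _ _ _ _ htm]
      have hg2 : PySem.List.pyGetD
          ((List.range ((seq2.toList.length : Int) - k + 1).toNat).map (fun t => pvWnd seq2.toList K t))
          ((j : Nat) : Int) 0 = pvWnd seq2.toList K j := by
        rw [PySem.List.pyGetD_natCast, PySem.List.getD_map_range _ _ _ _ hjm]
      simp only [hg1, hg2]
      by_cases hw : pvWnd seq1.toList K t = pvWnd seq2.toList K j
      · rw [if_pos hw]
        obtain ⟨hb1, hb2⟩ := hm t htm j hjm hw.symm
        have hcv1 : convertPosA (((t : Nat) : Int) + k - 1) align1 =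
            some (pvApos align1.toList (t + K - 1)) := by
          rw [show (((t : Nat) : Int) + k - 1) = ((t + K - 1 : Nat) : Int) from by omega]
          exact convertPosA_eq align1 _ (by omega) (by rw [Int.toNat_natCast]; omega)
        have hcv2 : convertPosA (((j : Nat) : Int) + k - 1) align2 =
            some (pvApos align2.toList (j + K - 1)) := by
          rw [show (((j : Nat) : Int) + k - 1) = ((j + K - 1 : Nat) : Int) from by omega]
          exact convertPosA_eq align2 _ (by omega) (by rw [Int.toNat_natCast]; omega)
        simp only [isAlignedA, hcv1, hcv2]
        by_cases hap : pvApos align1.toList (t + K - 1) = pvApos align2.toList (j + K - 1)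
        · rw [if_pos (by simpa using hap), if_neg (fun hxx => hxx.2 hap)]
        · rw [if_neg (by simpa using hap), if_pos ⟨hw.symm, hap⟩]
      · rw [if_neg hw, if_neg (fun hxx => hw hxx.1.symm)]

-- B evaluates to the difference-of-counts sum
theorem B_eval (seq1 seq2 : String) (k : Int) (align1 align2 : String) (K : Nat)
    (hk : k = (K : Int)) (hK : 1 ≤ K)
    (hm : ∀ t, t < ((seq1.toList.length : Int) - k + 1).toNat →
      ∀ j, j < ((seq2.toList.length : Int) - k + 1).toNat →
      pvWnd seq2.toList K j = pvWnd seq1.toList K t →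
      (t + K - 1 ≤ pvNondash align1.toList ∧ j + K - 1 ≤ pvNondash align2.toList)) :
    getSmilarityExcludeAlignment_alt seq1 seq2 k align1 align2 =
      ((List.range ((seq1.toList.length : Int) - k + 1).toNat).map (fun t =>
        ((List.range ((seq2.toList.length : Int) - k + 1).toNat).countP (fun j =>
          decide (pvWnd seq2.toList K j = pvWnd seq1.toList K t)) : Int) -
        ((List.range ((seq2.toList.length : Int) - k + 1).toNat).countP (fun j =>
          decide (pvWnd seq2.toList K j = pvWnd seq1.toList K t ∧
            pvApos align2.toList (j + K - 1) = pvApos align1.toList (t + K - 1))) : Int))).sum := by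
  unfold getSmilarityExcludeAlignment_alt
  simp only [hashesB_eq seq1.toList k K hk, hashesB_eq seq2.toList k K hk]
  rw [enumerate_map_range, enumerate_map_range]
  simp only [List.foldl_map]
  rw [foldl_option_some _ _
    (fun (s : PySem.Dict Int Int × PySem.Dict (Int × Nat) Int) (j : Nat) =>
      ((fun (d : PySem.Dict Int Int) (j : Nat) =>
          if (PySem.Set.ofList ((List.range ((seq1.toList.length : Int) - k + 1).toNat).map
              (fun t => pvWnd seq1.toList K t))).contains (pvWnd seq2.toList K j) then
            d.insert (pvWnd seq2.toList K j) (d.getD (pvWnd seq2.toList K j) 0 + 1) else d) s.1 j,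
       (fun (d : PySem.Dict (Int × Nat) Int) (j : Nat) =>
          if (PySem.Set.ofList ((List.range ((seq1.toList.length : Int) - k + 1).toNat).map
              (fun t => pvWnd seq1.toList K t))).contains (pvWnd seq2.toList K j) then
            d.insert (pvWnd seq2.toList K j, pvApos align2.toList (j + K - 1))
              (d.getD (pvWnd seq2.toList K j, pvApos align2.toList (j + K - 1)) 0 + 1) else d) s.2 j))
    ?hf2]
  case hf2 =>
    intro s j hj
    have hjm : j < ((seq2.toList.length : Int) - k + 1).toNat := List.mem_range.mp hj
    have hjK : j + K ≤ seq2.toList.length := by omega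
    by_cases hP : (PySem.Set.ofList ((List.range ((seq1.toList.length : Int) - k + 1).toNat).map
        (fun t => pvWnd seq1.toList K t))).contains (pvWnd seq2.toList K j) = true
    · have hmem : pvWnd seq2.toList K j ∈ (List.range ((seq1.toList.length : Int) - k + 1).toNat).map
          (fun t => pvWnd seq1.toList K t) :=
        (PySem.Set.mem_ofList _ _).mp ((PySem.Set.contains_iff
          (PySem.Set.ofList ((List.range ((seq1.toList.length : Int) - k + 1).toNat).map
            (fun t => pvWnd seq1.toList K t))) (pvWnd seq2.toList K j)).mp hP)
      obtain ⟨t, htm, hwt⟩ := List.mem_map.mp hmem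
      obtain ⟨hb1, hb2⟩ := hm t (List.mem_range.mp htm) j hjm hwt.symm
      have hap : apB align2.toList (((j : Nat) : Int) + k - 1) =
          some (pvApos align2.toList (j + K - 1)) := by
        rw [show (((j : Nat) : Int) + k - 1) = ((j + K - 1 : Nat) : Int) from by omega,
            apB_some _ _ (by omega) (by rw [Int.toNat_natCast]; omega), Int.toNat_natCast]
      simp only [hP, if_true, hap]
    · have hPf : (PySem.Set.ofList ((List.range ((seq1.toList.length : Int) - k + 1).toNat).map
          (fun t => pvWnd seq1.toList K t))).contains (pvWnd seq2.toList K j) = false := by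
        simpa using hP
      simp only [hPf, Bool.false_eq_true, if_false]
  rw [PySem.List.foldl_prod_mk
    (f := fun (d : PySem.Dict Int Int) (j : Nat) =>
          if (PySem.Set.ofList ((List.range ((seq1.toList.length : Int) - k + 1).toNat).map
              (fun t => pvWnd seq1.toList K t))).contains (pvWnd seq2.toList K j) then
            d.insert (pvWnd seq2.toList K j) (d.getD (pvWnd seq2.toList K j) 0 + 1) else d)
    (g := fun (d : PySem.Dict (Int × Nat) Int) (j : Nat) =>
          if (PySem.Set.ofList ((List.range ((seq1.toList.length : Int) - k + 1).toNat).map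
              (fun t => pvWnd seq1.toList K t))).contains (pvWnd seq2.toList K j) then
            d.insert (pvWnd seq2.toList K j, pvApos align2.toList (j + K - 1))
              (d.getD (pvWnd seq2.toList K j, pvApos align2.toList (j + K - 1)) 0 + 1) else d)]
  dsimp only
  rw [foldl_option_some _ _
    (fun (ct : Int) (i : Nat) =>
      if ((List.range ((seq2.toList.length : Int) - k + 1).toNat).foldl
        (fun (d : PySem.Dict Int Int) (j : Nat) =>
          if (PySem.Set.ofList ((List.range ((seq1.toList.length : Int) - k + 1).toNat).map
              (fun t => pvWnd seq1.toList K t))).contains (pvWnd seq2.toList K j) then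
            d.insert (pvWnd seq2.toList K j) (d.getD (pvWnd seq2.toList K j) 0 + 1) else d)
        PySem.Dict.empty).getD (pvWnd seq1.toList K i) 0 ≠ 0 then
        ct + (((List.range ((seq2.toList.length : Int) - k + 1).toNat).foldl
          (fun (d : PySem.Dict Int Int) (j : Nat) =>
            if (PySem.Set.ofList ((List.range ((seq1.toList.length : Int) - k + 1).toNat).map
                (fun t => pvWnd seq1.toList K t))).contains (pvWnd seq2.toList K j) then
              d.insert (pvWnd seq2.toList K j) (d.getD (pvWnd seq2.toList K j) 0 + 1) else d)
          PySem.Dict.empty).getD (pvWnd seq1.toList K i) 0 -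
          ((List.range ((seq2.toList.length : Int) - k + 1).toNat).foldl
          (fun (d : PySem.Dict (Int × Nat) Int) (j : Nat) =>
            if (PySem.Set.ofList ((List.range ((seq1.toList.length : Int) - k + 1).toNat).map
                (fun t => pvWnd seq1.toList K t))).contains (pvWnd seq2.toList K j) then
              d.insert (pvWnd seq2.toList K j, pvApos align2.toList (j + K - 1))
                (d.getD (pvWnd seq2.toList K j, pvApos align2.toList (j + K - 1)) 0 + 1) else d)
          PySem.Dict.empty).getD (pvWnd seq1.toList K i, pvApos align1.toList (i + K - 1)) 0)
      else ct)
    ?hf1]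
  case hf1 =>
    intro ct i hi
    dsimp only
    have him : i < ((seq1.toList.length : Int) - k + 1).toNat := List.mem_range.mp hi
    have hiK : i + K ≤ seq1.toList.length := by omega
    by_cases hc : ((List.range ((seq2.toList.length : Int) - k + 1).toNat).foldl
        (fun (d : PySem.Dict Int Int) (j : Nat) =>
          if (PySem.Set.ofList ((List.range ((seq1.toList.length : Int) - k + 1).toNat).map
              (fun t => pvWnd seq1.toList K t))).contains (pvWnd seq2.toList K j) then
            d.insert (pvWnd seq2.toList K j) (d.getD (pvWnd seq2.toList K j) 0 + 1) else d)
        PySem.Dict.empty).getD (pvWnd seq1.toList K i) 0 = 0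
    · rw [if_neg (fun h => h hc), if_neg (fun h => h hc)]
    · have hcount := getD_foldl_cond_insert (List.range ((seq2.toList.length : Int) - k + 1).toNat)
        (fun j => (PySem.Set.ofList ((List.range ((seq1.toList.length : Int) - k + 1).toNat).map
            (fun t => pvWnd seq1.toList K t))).contains (pvWnd seq2.toList K j))
        (fun j => pvWnd seq2.toList K j) (pvWnd seq1.toList K i) PySem.Dict.empty
      rw [PySem.Dict.getD_empty, zero_add] at hcount
      have hpos : 0 < (List.range ((seq2.toList.length : Int) - k + 1).toNat).countP
          (fun j => (PySem.Set.ofList ((List.range ((seq1.toList.length : Int) - k + 1).toNat).map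
              (fun t => pvWnd seq1.toList K t))).contains (pvWnd seq2.toList K j) &&
            (pvWnd seq2.toList K j == pvWnd seq1.toList K i)) := by
        by_contra h0
        apply hc
        rw [hcount]
        omega
      obtain ⟨j, hjmem, hjp⟩ := List.countP_pos_iff.mp hpos
      have hjm : j < ((seq2.toList.length : Int) - k + 1).toNat := List.mem_range.mp hjmem
      have hweq : pvWnd seq2.toList K j = pvWnd seq1.toList K i := by
        have := (Bool.and_eq_true _ _).mp hjp
        exact beq_iff_eq.mp this.2
      obtain ⟨hb1, -⟩ := hm i him j hjm hweq
      have hap : apB align1.toList (((i : Nat) : Int) + k - 1) =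
          some (pvApos align1.toList (i + K - 1)) := by
        rw [show (((i : Nat) : Int) + k - 1) = ((i + K - 1 : Nat) : Int) from by omega,
            apB_some _ _ (by omega) (by rw [Int.toNat_natCast]; omega), Int.toNat_natCast]
      rw [if_pos hc, if_pos hc]
      simp only [hap]
  rw [Option.getD_some]
  have hcongr : ∀ (acc : Int) (i : Nat), i ∈ List.range ((seq1.toList.length : Int) - k + 1).toNat →
      (if ((List.range ((seq2.toList.length : Int) - k + 1).toNat).foldl
        (fun (d : PySem.Dict Int Int) (j : Nat) =>
          if (PySem.Set.ofList ((List.range ((seq1.toList.length : Int) - k + 1).toNat).map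
              (fun t => pvWnd seq1.toList K t))).contains (pvWnd seq2.toList K j) then
            d.insert (pvWnd seq2.toList K j) (d.getD (pvWnd seq2.toList K j) 0 + 1) else d)
        PySem.Dict.empty).getD (pvWnd seq1.toList K i) 0 ≠ 0 then
        acc + (((List.range ((seq2.toList.length : Int) - k + 1).toNat).foldl
          (fun (d : PySem.Dict Int Int) (j : Nat) =>
            if (PySem.Set.ofList ((List.range ((seq1.toList.length : Int) - k + 1).toNat).map
                (fun t => pvWnd seq1.toList K t))).contains (pvWnd seq2.toList K j) then
              d.insert (pvWnd seq2.toList K j) (d.getD (pvWnd seq2.toList K j) 0 + 1) else d)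
          PySem.Dict.empty).getD (pvWnd seq1.toList K i) 0 -
          ((List.range ((seq2.toList.length : Int) - k + 1).toNat).foldl
          (fun (d : PySem.Dict (Int × Nat) Int) (j : Nat) =>
            if (PySem.Set.ofList ((List.range ((seq1.toList.length : Int) - k + 1).toNat).map
                (fun t => pvWnd seq1.toList K t))).contains (pvWnd seq2.toList K j) then
              d.insert (pvWnd seq2.toList K j, pvApos align2.toList (j + K - 1))
                (d.getD (pvWnd seq2.toList K j, pvApos align2.toList (j + K - 1)) 0 + 1) else d)
          PySem.Dict.empty).getD (pvWnd seq1.toList K i, pvApos align1.toList (i + K - 1)) 0)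
      else acc) =
      acc + (((List.range ((seq2.toList.length : Int) - k + 1).toNat).countP (fun j =>
          decide (pvWnd seq2.toList K j = pvWnd seq1.toList K i)) : Int) -
        ((List.range ((seq2.toList.length : Int) - k + 1).toNat).countP (fun j =>
          decide (pvWnd seq2.toList K j = pvWnd seq1.toList K i ∧
            pvApos align2.toList (j + K - 1) = pvApos align1.toList (i + K - 1))) : Int)) := by
    intro acc i hi
    have him : i < ((seq1.toList.length : Int) - k + 1).toNat := List.mem_range.mp hi
    have hPi : ∀ j, pvWnd seq2.toList K j = pvWnd seq1.toList K i →
        (PySem.Set.ofList ((List.range ((seq1.toList.length : Int) - k + 1).toNat).map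
          (fun t => pvWnd seq1.toList K t))).contains (pvWnd seq2.toList K j) = true := by
      intro j hj
      rw [hj]
      exact (PySem.Set.contains_iff
        (PySem.Set.ofList ((List.range ((seq1.toList.length : Int) - k + 1).toNat).map
          (fun t => pvWnd seq1.toList K t))) (pvWnd seq1.toList K i)).mpr
        ((PySem.Set.mem_ofList _ _).mpr
          (List.mem_map.mpr ⟨i, List.mem_range.mpr him, rfl⟩))
    have hC1 : ((List.range ((seq2.toList.length : Int) - k + 1).toNat).foldl
        (fun (d : PySem.Dict Int Int) (j : Nat) =>
          if (PySem.Set.ofList ((List.range ((seq1.toList.length : Int) - k + 1).toNat).map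
              (fun t => pvWnd seq1.toList K t))).contains (pvWnd seq2.toList K j) then
            d.insert (pvWnd seq2.toList K j) (d.getD (pvWnd seq2.toList K j) 0 + 1) else d)
        PySem.Dict.empty).getD (pvWnd seq1.toList K i) 0 =
        ((List.range ((seq2.toList.length : Int) - k + 1).toNat).countP (fun j =>
          decide (pvWnd seq2.toList K j = pvWnd seq1.toList K i)) : Int) := by
      rw [getD_foldl_cond_insert _ _ (fun j => pvWnd seq2.toList K j) _ PySem.Dict.empty,
          PySem.Dict.getD_empty, zero_add]
      congr 1
      apply List.countP_congr
      intro j _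
      by_cases hw : pvWnd seq2.toList K j = pvWnd seq1.toList K i
      · rw [hPi j hw]
        simp [hw]
      · simp [hw]
    have hC2 : ((List.range ((seq2.toList.length : Int) - k + 1).toNat).foldl
        (fun (d : PySem.Dict (Int × Nat) Int) (j : Nat) =>
          if (PySem.Set.ofList ((List.range ((seq1.toList.length : Int) - k + 1).toNat).map
              (fun t => pvWnd seq1.toList K t))).contains (pvWnd seq2.toList K j) then
            d.insert (pvWnd seq2.toList K j, pvApos align2.toList (j + K - 1))
              (d.getD (pvWnd seq2.toList K j, pvApos align2.toList (j + K - 1)) 0 + 1) else d)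
        PySem.Dict.empty).getD (pvWnd seq1.toList K i, pvApos align1.toList (i + K - 1)) 0 =
        ((List.range ((seq2.toList.length : Int) - k + 1).toNat).countP (fun j =>
          decide (pvWnd seq2.toList K j = pvWnd seq1.toList K i ∧
            pvApos align2.toList (j + K - 1) = pvApos align1.toList (i + K - 1))) : Int) := by
      rw [getD_foldl_cond_insert _ _
          (fun j => (pvWnd seq2.toList K j, pvApos align2.toList (j + K - 1))) _ PySem.Dict.empty,
          PySem.Dict.getD_empty, zero_add]
      congr 1
      apply List.countP_congr
      intro j _
      by_cases hw : pvWnd seq2.toList K j = pvWnd seq1.toList K i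
      · rw [hPi j hw]
        simp [hw, Prod.ext_iff]
      · simp [hw, Prod.ext_iff]
    rw [hC1, hC2]
    by_cases h0 : ((List.range ((seq2.toList.length : Int) - k + 1).toNat).countP (fun j =>
        decide (pvWnd seq2.toList K j = pvWnd seq1.toList K i))) = 0
    · rw [if_neg (fun hh => hh (by exact_mod_cast h0))]
      have hle : ((List.range ((seq2.toList.length : Int) - k + 1).toNat).countP (fun j =>
          decide (pvWnd seq2.toList K j = pvWnd seq1.toList K i ∧
            pvApos align2.toList (j + K - 1) = pvApos align1.toList (i + K - 1)))) ≤
          ((List.range ((seq2.toList.length : Int) - k + 1).toNat).countP (fun j =>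
          decide (pvWnd seq2.toList K j = pvWnd seq1.toList K i))) := by
        apply List.countP_mono_left
        intro a _ ha
        simp only [decide_eq_true_eq] at ha ⊢
        exact ha.1
      have h2 : ((List.range ((seq2.toList.length : Int) - k + 1).toNat).countP (fun j =>
          decide (pvWnd seq2.toList K j = pvWnd seq1.toList K i ∧
            pvApos align2.toList (j + K - 1) = pvApos align1.toList (i + K - 1)))) = 0 := by omega
      rw [h0, h2]
      push_cast
      ring
    · rw [if_pos (fun hh => h0 (by exact_mod_cast hh))]
  rw [PySem.List.foldl_congr_mem _ _ _ _ hcongr, PySem.List.foldl_add, zero_add]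

-- ===== VERDICT (by name: the statement is the Claim_ definition above) =====
theorem getSmilarityExcludeAlignment_spec : Claim_equal_getSmilarityExcludeAlignment := by
  intro seq1 seq2 k align1 align2 _ hpre
  obtain ⟨hk1, hwin⟩ := hpre
  unfold Spec_getSmilarityExcludeAlignment
  have hK : k = (k.toNat : Int) := by omega
  have hk1' : 1 ≤ k.toNat := by omega
  have hm : ∀ t, t < ((seq1.toList.length : Int) - k + 1).toNat →
      ∀ j, j < ((seq2.toList.length : Int) - k + 1).toNat →
      pvWnd seq2.toList k.toNat j = pvWnd seq1.toList k.toNat t →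
      (t + k.toNat - 1 ≤ pvNondash align1.toList ∧ j + k.toNat - 1 ≤ pvNondash align2.toList) := by
    intro t ht j hj hwnd
    have htK : t + k.toNat ≤ seq1.toList.length := by omega
    have hjK : j + k.toNat ≤ seq2.toList.length := by omega
    have := (wnd_eq_iff seq1.toList seq2.toList k.toNat t j htK hjK).mp hwnd
    exact hwin t ht j hj this.symm
  rw [A_eval seq1 seq2 k align1 align2 k.toNat hK hk1' hm,
      B_eval seq1 seq2 k align1 align2 k.toNat hK hk1' hm]
  apply congrArg List.sum
  apply List.map_congr_left
  intro t _
  set m2 := ((seq2.toList.length : Int) - k + 1).toNat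
  have hc : ((List.range m2).countP (fun j =>
        decide (pvWnd seq2.toList k.toNat j = pvWnd seq1.toList k.toNat t ∧
          pvApos align1.toList (t + k.toNat - 1) ≠ pvApos align2.toList (j + k.toNat - 1)))) =
      ((List.range m2).countP (fun j =>
        decide (pvWnd seq2.toList k.toNat j = pvWnd seq1.toList k.toNat t ∧
          ¬ pvApos align2.toList (j + k.toNat - 1) = pvApos align1.toList (t + k.toNat - 1)))) := by
    apply List.countP_congr
    intro j _
    simp only [decide_eq_true_eq, ne_eq]
    constructor
    · rintro ⟨h1, h2⟩; exact ⟨h1, fun h => h2 h.symm⟩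
    · rintro ⟨h1, h2⟩; exact ⟨h1, fun h => h2 h.symm⟩
  rw [hc, countP_and_ne (List.range m2)
    (fun j => pvWnd seq2.toList k.toNat j = pvWnd seq1.toList k.toNat t)
    (fun j => pvApos align2.toList (j + k.toNat - 1) = pvApos align1.toList (t + k.toNat - 1))]
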